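-- pv_equiv track=rewrite | github.com/jquesada959/main | london/merge_unique_diff_macs.py | find_mac_field
-- ===== SOURCE A (Python) =====
-- def find_mac_field(fieldnames):
--     lower = [f.lower() for f in (fieldnames or [])]
--     if 'mac address' in lower:
--         return fieldnames[lower.index('mac address')]
--     for i, f in enumerate(lower):
--         if 'mac' in f:
--             return fieldnames[i]
--     return None
-- ===== SOURCE B (Python) =====
-- def find_mac_field(fieldnames):
--     fallback = None
--     for f in (fieldnames or []):
--         low = f.lower()
--         if low == 'mac address':
--             return f
--         if fallback is None and 'mac' in low:
--             fallback = f
--     return fallback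
-- ===== Notes on version B (the rewrite author's own statement) =====
-- stated objective: simpler
-- what changed: Replaced A's three passes (lowercase-map the whole list, list membership + .index for the exact match, then an enumerate scan for the substring match) by one short-circuiting pass that lowercases each field on the fly, returns immediately on an exact 'mac address' match and remembers only the first 'mac'-substring hit as a fallback.
import Mathlib
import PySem

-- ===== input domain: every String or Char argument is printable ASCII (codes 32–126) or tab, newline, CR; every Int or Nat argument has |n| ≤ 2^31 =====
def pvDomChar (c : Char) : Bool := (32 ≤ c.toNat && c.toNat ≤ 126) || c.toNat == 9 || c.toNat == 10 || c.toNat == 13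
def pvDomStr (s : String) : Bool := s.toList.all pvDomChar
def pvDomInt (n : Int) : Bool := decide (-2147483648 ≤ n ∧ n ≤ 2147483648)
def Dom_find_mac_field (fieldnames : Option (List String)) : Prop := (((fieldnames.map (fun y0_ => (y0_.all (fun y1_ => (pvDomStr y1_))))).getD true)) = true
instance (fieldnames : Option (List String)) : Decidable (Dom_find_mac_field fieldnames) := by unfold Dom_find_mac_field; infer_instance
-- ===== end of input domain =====

-- B merges A's exact-match membership/index pass and substring pass into one
-- short-circuiting scan with a first-substring-hit fallback (objective: simpler).

-- ===== PORT A =====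
-- 'for i, f in enumerate(lower): if 'mac' in f: return fieldnames[i]'
-- (index carried as k; fieldnames is indexed through 'fieldnames or []', which is
--  identical to the raw fieldnames whenever the index is reachable)
def findMacLoopA (fns : List String) (k : Nat) : List String → Option String
  | [] => none
  | f :: rest =>
    if PySem.Str.isIn "mac" f then PySem.List.pyGet? fns (k : Int)
    else findMacLoopA fns (k + 1) rest

def find_mac_field (fieldnames : Option (List String)) : Option String :=
  let fns := fieldnames.getD []          -- fieldnames or []
  let lower := fns.map PySem.Str.lower
  if lower.contains "mac address" then
    match PySem.List.index? lower "mac address" with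
    | some i => PySem.List.pyGet? fns (i : Int)
    | none => none                        -- unreachable: membership just checked
  else
    findMacLoopA fns 0 lower

-- ===== PORT B =====
def findMacLoopB : List String → Option String → Option String
  | [], fallback => fallback
  | f :: rest, fallback =>
    let low := PySem.Str.lower f
    if low == "mac address" then some f
    else findMacLoopB rest
      (if fallback.isNone && PySem.Str.isIn "mac" low then some f else fallback)

def find_mac_field_alt (fieldnames : Option (List String)) : Option String :=
  findMacLoopB (fieldnames.getD []) none

-- ===== PRECONDITION & SPEC =====
def Spec_find_mac_field (fieldnames : Option (List String)) (out : Option String) : Prop := out = find_mac_field_alt fieldnames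
instance (fieldnames : Option (List String)) (out : Option String) : Decidable (Spec_find_mac_field fieldnames out) := by unfold Spec_find_mac_field; infer_instance

-- ===== CLAIM (what is proved, stated in full; the proofs are below) =====
def Claim_equal_find_mac_field : Prop := ∀ (fieldnames : Option (List String)), Dom_find_mac_field fieldnames → Spec_find_mac_field fieldnames (find_mac_field fieldnames)

-- ===== LEMMAS AND PROOFS =====

-- first field whose lowercase is exactly "mac address"
def firstExact (l : List String) : Option String :=
  l.find? (fun f => PySem.Str.lower f == "mac address")

-- first field whose lowercase contains "mac"
def firstSub (l : List String) : Option String :=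
  l.find? (fun f => PySem.Str.isIn "mac" (PySem.Str.lower f))

theorem loopB_spec (l : List String) :
    ∀ fb, findMacLoopB l fb =
      match firstExact l with
      | some f => some f
      | none => if fb.isSome then fb else firstSub l := by
  induction l with
  | nil =>
    intro fb
    cases fb <;> simp [findMacLoopB, firstExact, firstSub]
  | cons f rest ih =>
    intro fb
    by_cases hx : PySem.Str.lower f == "mac address"
    · simp [findMacLoopB, firstExact, hx]
    · rw [show findMacLoopB (f :: rest) fb =
          findMacLoopB rest
            (if fb.isNone && PySem.Str.isIn "mac" (PySem.Str.lower f) then some f else fb) by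
          simp [findMacLoopB, hx]]
      rw [ih]
      have hfe : firstExact (f :: rest) = firstExact rest := by
        simp [firstExact, hx]
      rw [hfe]
      cases hE : firstExact rest with
      | some g => simp
      | none =>
        cases fb with
        | some x => simp
        | none =>
          by_cases hs : PySem.Chars.isIn ['m', 'a', 'c'] (PySem.Chars.lower f.toList) = true
          <;> simp [firstSub, PySem.Str.isIn, hs]

theorem loopA_spec (low : List String) :
    ∀ (fns : List String) (k : Nat), low = (fns.drop k).map PySem.Str.lower →
      findMacLoopA fns k low = firstSub (fns.drop k) := by
  induction low with
  | nil =>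
    intro fns k h
    have hnil : fns.drop k = [] := by
      cases hdk : fns.drop k with
      | nil => rfl
      | cons b tail => rw [hdk] at h; simp at h
    simp [findMacLoopA, firstSub, hnil]
  | cons a rest ih =>
    intro fns k h
    obtain ⟨b, tail, hd, hb, htail⟩ :
        ∃ b tail, fns.drop k = b :: tail ∧ a = PySem.Str.lower b ∧
          rest = tail.map PySem.Str.lower := by
      cases hdk : fns.drop k with
      | nil => rw [hdk] at h; simp at h
      | cons b tail =>
        rw [hdk] at h; simp at h
        exact ⟨b, tail, rfl, h.1, h.2⟩
    subst hb; subst htail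
    have hget : fns[k]? = some b := by
      have h0 : (fns.drop k)[0]? = fns[k + 0]? := List.getElem?_drop ..
      simpa [hd] using h0.symm
    have hdrop1 : fns.drop (k + 1) = tail := by
      rw [← List.tail_drop, hd, List.tail_cons]
    by_cases hs : PySem.Chars.isIn ['m', 'a', 'c'] (PySem.Chars.lower b.toList) = true
    · simp [findMacLoopA, PySem.Str.isIn, hs, hget, hd, firstSub]
    · rw [show findMacLoopA fns k (PySem.Str.lower b :: tail.map PySem.Str.lower) =
          findMacLoopA fns (k + 1) (tail.map PySem.Str.lower) by
        simp [findMacLoopA, PySem.Str.isIn, hs]]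
      rw [ih fns (k + 1) (by rw [hdrop1]), hdrop1, hd]
      simp [firstSub, PySem.Str.isIn, hs]

theorem exact_branch (l : List String) :
    (l.map PySem.Str.lower).contains "mac address" = true →
      (match PySem.List.index? (l.map PySem.Str.lower) "mac address" with
        | some i => PySem.List.pyGet? l (i : Int)
        | none => (none : Option String)) = firstExact l := by
  induction l with
  | nil => simp
  | cons b t ih =>
    intro hc
    by_cases hx : PySem.Str.lower b == "mac address"
    · have hxe : PySem.Str.lower b = "mac address" := by simpa using hx
      rw [show (b :: t).map PySem.Str.lower = "mac address" :: t.map PySem.Str.lower by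
        simp [hxe], PySem.List.index?_cons_self]
      simp [firstExact, hx]
    · have hxe : PySem.Str.lower b ≠ "mac address" := by simpa using hx
      have hc' : (t.map PySem.Str.lower).contains "mac address" = true := by
        simp at hc ⊢
        rcases hc with hc | hc
        · exact absurd hc.symm hxe
        · exact hc
      rw [show (b :: t).map PySem.Str.lower =
            PySem.Str.lower b :: t.map PySem.Str.lower by simp,
        PySem.List.index?_cons_of_ne (List.map PySem.Str.lower t) hxe]
      have hfe : firstExact (b :: t) = firstExact t := by
        simp [firstExact, hx]
      rw [hfe, ← ih hc']
      cases hi : PySem.List.index? (t.map PySem.Str.lower) "mac address" with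
      | none => simp
      | some i =>
        simp only [Option.map_some]
        have hcast : ((i + 1 : Nat) : Int) = (i : Int) + 1 := by push_cast; ring
        rw [hcast, PySem.List.pyGet?_cons_succ]

theorem side_eq (l : List String) :
    find_mac_field (some l) = find_mac_field_alt (some l) := by
  rw [find_mac_field_alt]
  simp only [Option.getD_some]
  rw [loopB_spec _ none]
  rw [find_mac_field]
  simp only [Option.getD_some]
  by_cases hc : (l.map PySem.Str.lower).contains "mac address"
  · rw [if_pos hc, exact_branch l hc]
    cases hE : firstExact l with
    | none =>
      exfalso
      have hE0 : l.find? (fun f => PySem.Str.lower f == "mac address") = none := hE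
      have hnone : ∀ f ∈ l, PySem.Str.lower f ≠ "mac address" := by
        intro f hf
        have := List.find?_eq_none.mp hE0 f hf
        simpa using this
      have hmem : "mac address" ∈ l.map PySem.Str.lower := by
        simpa using hc
      obtain ⟨f, hf, hfe⟩ := List.mem_map.mp hmem
      exact hnone f hf hfe
    | some g => simp
  · rw [if_neg hc, loopA_spec (l.map PySem.Str.lower) l 0 (by simp)]
    simp only [List.drop_zero]
    cases hE : firstExact l with
    | none => simp
    | some g =>
      exfalso
      have hgl : g ∈ l := List.mem_of_find?_eq_some (by simpa [firstExact] using hE)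
      have hg : PySem.Str.lower g = "mac address" := by
        have := List.find?_eq_some_iff_append.mp (by simpa [firstExact] using hE)
        simpa using this.1
      have : "mac address" ∈ l.map PySem.Str.lower :=
        hg ▸ List.mem_map_of_mem hgl
      exact hc (List.contains_iff_mem.mpr this)

-- ===== VERDICT (by name: the statement is the Claim_ definition above) =====
theorem find_mac_field_spec : Claim_equal_find_mac_field := by
  intro fieldnames _
  unfold Spec_find_mac_field
  cases fieldnames with
  | none => rfl
  | some l => exact side_eq l
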